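-- pv_equiv track=rewrite | github.com/Captainmorgan37/AirSprint-Tools | pages/Task_Splitter.py | _disambiguate_labels
-- ===== SOURCE A (Python) =====
-- from collections import Counter, defaultdict
-- from typing import List, Dict, Any, Tuple, Optional, Set, Sequence
--
-- def _alphabetical_suffix(index: int) -> str:
--     if index < 0:
--         return ""
--     letters: List[str] = []
--     while True:
--         index, remainder = divmod(index, 26)
--         letters.append(chr(ord("A") + remainder))
--         if index == 0:
--             break
--         index -= 1
--     return "".join(reversed(letters))
--
-- def _disambiguate_labels(labels: Sequence[str]) -> List[str]:
--     normalized = [label or "Shift" for label in labels]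
--     counts = Counter(normalized)
--     occurrences: defaultdict[str, int] = defaultdict(int)
--     result: List[str] = []
--     for base, original in zip(normalized, labels):
--         total = counts[base]
--         if total <= 1:
--             result.append(original or base)
--             continue
--         occurrence = occurrences[base]
--         occurrences[base] += 1
--         suffix = _alphabetical_suffix(occurrence)
--         result.append(f"{base}{suffix}")
--     return result
-- ===== SOURCE B (Python) =====
-- from collections import defaultdict
--
--
-- def _alphabetical_suffix(index: int) -> str:
--     if index < 0:
--         return ""
--     letters = []
--     while True:
--         index, remainder = divmod(index, 26)
--         letters.append(chr(ord("A") + remainder))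
--         if index == 0:
--             break
--         index -= 1
--     return "".join(reversed(letters))
--
--
-- def _disambiguate_labels(labels):
--     groups = defaultdict(list)
--     for i, label in enumerate(labels):
--         groups[label or "Shift"].append(i)
--     result = [""] * len(labels)
--     for base, positions in groups.items():
--         if len(positions) == 1:
--             i = positions[0]
--             result[i] = labels[i] or base
--         else:
--             for k, i in enumerate(positions):
--                 result[i] = base + _alphabetical_suffix(k)
--     return result
-- ===== Notes on version B (the rewrite author's own statement) =====
-- stated objective: alternative
-- what changed: Replaces A's single in-order pass (Counter total + running per-base occurrence dict, appending to the result) by a group-and-scatter scheme: one pass groups each normalized base to its list of indices, then each group writes its disambiguated labels directly into a preallocated result list, singleton groups writing the raw label and larger groups writing base+suffix by position within the group.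
import Mathlib
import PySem

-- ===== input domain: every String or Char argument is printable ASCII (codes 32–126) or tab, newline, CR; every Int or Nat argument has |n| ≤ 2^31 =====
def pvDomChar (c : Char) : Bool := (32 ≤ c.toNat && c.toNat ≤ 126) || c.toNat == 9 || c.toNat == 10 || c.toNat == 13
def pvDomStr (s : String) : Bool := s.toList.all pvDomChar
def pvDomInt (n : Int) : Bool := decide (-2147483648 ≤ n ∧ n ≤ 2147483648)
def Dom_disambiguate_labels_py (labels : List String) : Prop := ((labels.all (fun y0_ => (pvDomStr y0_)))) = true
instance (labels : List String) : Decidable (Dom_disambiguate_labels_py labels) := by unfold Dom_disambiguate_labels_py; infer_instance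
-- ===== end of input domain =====

-- B replaces A's single counting pass (Counter + running occurrence dict, appending in input
-- order) by a group-and-scatter scheme: one grouping pass builds base -> list of indices, then
-- each group writes its labels directly into a preallocated result. Objective: alternative.

-- ===== PORT A =====
-- shared helper _alphabetical_suffix; the while-loop is entered only with index ≥ 0,
-- where Python's divmod(index, 26) coincides with Nat division/modulo (exact here).
def sufLoop (index : Nat) (letters : List Char) : List Char :=
  let q := index / 26
  let r := index % 26
  let letters := letters ++ [Char.ofNat (65 + r)]   -- chr(ord("A") + remainder)
  if q = 0 then letters else sufLoop (q - 1) letters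
termination_by index
decreasing_by
  have h1 : index / 26 ≤ index := Nat.div_le_self _ _
  omega

def alphabetical_suffix (index : Int) : String :=
  if index < 0 then "" else String.ofList ((sufLoop index.toNat []).reverse)

def disambiguate_labels_py (labels : List String) : List String :=
  let normalized := labels.map (fun label => if label == "" then "Shift" else label)
  let counts := PySem.Dict.counter normalized
  ((normalized.zip labels).foldl
    (fun (st : PySem.Dict String Int × List String) p =>
      let total := counts.getD p.1 0
      if total ≤ 1 then (st.1, st.2 ++ [if p.2 == "" then p.1 else p.2])
      else
        let occurrence := st.1.getD p.1 0
        (st.1.insert p.1 (occurrence + 1), st.2 ++ [p.1 ++ alphabetical_suffix occurrence]))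
    (PySem.Dict.empty, [])).2

-- ===== PORT B =====
def disambiguate_labels_py_alt (labels : List String) : List String :=
  let groups := (PySem.List.enumerate labels 0).foldl
      (fun (d : PySem.Dict String (List Int)) p =>
        d.modify (if p.2 == "" then "Shift" else p.2) [] (fun v => v ++ [p.1]))
      PySem.Dict.empty
  let result := List.replicate labels.length ""    -- [""] * len(labels)
  groups.items.foldl
    (fun res bp =>
      if bp.2.length == 1 then
        let i := PySem.List.pyGetD bp.2 0 0
        let orig := PySem.List.pyGetD labels i ""
        PySem.List.pySetD res i (if orig == "" then bp.1 else orig)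
      else
        (PySem.List.enumerate bp.2 0).foldl
          (fun r q => PySem.List.pySetD r q.2 (bp.1 ++ alphabetical_suffix q.1)) res)
    result

-- ===== PRECONDITION & SPEC =====
def Spec_disambiguate_labels_py (labels : List String) (out : List String) : Prop := out = disambiguate_labels_py_alt labels
instance (labels : List String) (out : List String) : Decidable (Spec_disambiguate_labels_py labels out) := by unfold Spec_disambiguate_labels_py; infer_instance

-- ===== CLAIM (what is proved, stated in full; the proofs are below) =====
def Claim_equal_disambiguate_labels_py : Prop := ∀ (labels : List String), Dom_disambiguate_labels_py labels → Spec_disambiguate_labels_py labels (disambiguate_labels_py labels)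

-- ===== LEMMAS AND PROOFS =====

-- normalization 'label or "Shift"'
def nfs (l : String) : String := if l == "" then "Shift" else l

-- the common pointwise description both ports are reduced to
def specList (labels : List String) : List String :=
  let norm := labels.map nfs
  (PySem.List.enumerate (norm.zip labels) 0).map (fun p =>
    if norm.count p.2.1 == 1 then (if p.2.2 == "" then p.2.1 else p.2.2)
    else p.2.1 ++ alphabetical_suffix (((PySem.List.slice norm none (some p.1)).count p.2.1 : Int)))

-- ---------- A = specList (loop invariant on A's accumulating fold) ----------
lemma dis_loop (norm labs : List String) :
  ∀ (rest : List (String × String)) (i : Nat) (occ : PySem.Dict String Int) (res : List String),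
    rest = (norm.zip labs).drop i →
    (∀ b, 1 < norm.count b → occ.getD b 0 = ((norm.take i).count b : Int)) →
    (rest.foldl
      (fun (st : PySem.Dict String Int × List String) p =>
        let total := (PySem.Dict.counter norm).getD p.1 0
        if total ≤ 1 then (st.1, st.2 ++ [if p.2 == "" then p.1 else p.2])
        else
          let occurrence := st.1.getD p.1 0
          (st.1.insert p.1 (occurrence + 1), st.2 ++ [p.1 ++ alphabetical_suffix occurrence]))
      (occ, res)).2
    = res ++ (PySem.List.enumerate rest (i : Int)).map (fun p =>
        if norm.count p.2.1 == 1 then (if p.2.2 == "" then p.2.1 else p.2.2)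
        else p.2.1 ++ alphabetical_suffix (((PySem.List.slice norm none (some p.1)).count p.2.1 : Int))) := by
  intro rest
  induction rest with
  | nil => intro i occ res _ _; simp [PySem.List.enumerate_nil]
  | cons hd tl ih =>
    intro i occ res hdrop hocc
    have hget : (norm.zip labs)[i]? = some hd := by
      have h0 : ((norm.zip labs).drop i)[0]? = some hd := by rw [← hdrop]; rfl
      simpa using h0
    have htl : tl = (norm.zip labs).drop (i + 1) := by
      have := congrArg List.tail hdrop
      simpa [List.tail_drop] using this
    have hnormi : norm[i]? = some hd.1 := by
      rcases List.getElem?_zip_eq_some.mp (by simpa using hget) with ⟨h1, _⟩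
      exact h1
    have hmem : hd.1 ∈ norm := List.mem_of_getElem? hnormi
    have hpos : 0 < norm.count hd.1 := List.count_pos_iff.mpr hmem
    have htake : norm.take (i + 1) = norm.take i ++ [hd.1] := by
      rw [List.take_add_one, hnormi]; rfl
    have hcnt : (PySem.Dict.counter norm).getD hd.1 0 = (norm.count hd.1 : Int) :=
      PySem.Dict.getD_counter norm hd.1
    simp only [List.foldl_cons, PySem.List.enumerate_cons]
    by_cases hone : norm.count hd.1 = 1
    · have hcond : ((PySem.Dict.counter norm).getD hd.1 0 ≤ 1) := by rw [hcnt, hone]; norm_num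
      rw [if_pos hcond]
      have hocc' : ∀ b, 1 < norm.count b → occ.getD b 0 = ((norm.take (i+1)).count b : Int) := by
        intro b hb
        have hne : hd.1 ≠ b := by intro h; rw [h] at hone; omega
        rw [htake, List.count_append]
        simpa [List.count_singleton, hne] using hocc b hb
      have := ih (i + 1) occ (res ++ [if hd.2 == "" then hd.1 else hd.2]) htl hocc'
      rw [this]
      have hbeq : (norm.count hd.1 == 1) = true := by simp [hone]
      simp only [hbeq, if_true, List.map_cons]
      push_cast
      simp [List.append_assoc]
    · have hgt : 1 < norm.count hd.1 := by omega
      have hcond : ¬ ((PySem.Dict.counter norm).getD hd.1 0 ≤ 1) := by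
        rw [hcnt]; exact_mod_cast by omega
      rw [if_neg hcond]
      have hoccv : occ.getD hd.1 0 = ((norm.take i).count hd.1 : Int) := hocc hd.1 hgt
      have hocc' : ∀ b, 1 < norm.count b →
          (occ.insert hd.1 (occ.getD hd.1 0 + 1)).getD b 0 = ((norm.take (i+1)).count b : Int) := by
        intro b hb
        rw [htake, List.count_append]
        by_cases hbe : b = hd.1
        · subst hbe
          rw [PySem.Dict.getD_insert_self, hoccv]
          simp
        · rw [PySem.Dict.getD_insert]
          have hne : hd.1 ≠ b := fun h => hbe h.symm
          simp only [if_neg hbe]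
          simpa [List.count_singleton, hne] using hocc b hb
      have := ih (i + 1)
          (occ.insert hd.1 (occ.getD hd.1 0 + 1))
          (res ++ [hd.1 ++ alphabetical_suffix (occ.getD hd.1 0)]) htl hocc'
      rw [this]
      have hbeq : (norm.count hd.1 == 1) = false := by simp; omega
      simp only [List.map_cons, hbeq, Bool.false_eq_true, if_false]
      have hslice : PySem.List.slice norm none (some (i : Int)) = norm.take i :=
        PySem.List.slice_to_natCast norm i
      rw [hslice, ← hoccv]
      push_cast
      simp [List.append_assoc]

lemma A_eq_specList (labels : List String) : disambiguate_labels_py labels = specList labels := by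
  unfold disambiguate_labels_py specList
  have hfun : (fun label => if label == "" then "Shift" else label) = nfs := rfl
  rw [hfun]
  have h := dis_loop (labels.map nfs) labels
      ((labels.map nfs).zip labels) 0 PySem.Dict.empty []
      (by simp) (by intro b _; simp [PySem.Dict.getD_empty])
  simpa using h

-- ---------- B-side machinery ----------
-- positions (starting at offset s) of the labels whose normalization is b
def posL (ls : List String) (s : Int) (b : String) : List Int :=
  match ls with
  | [] => []
  | x :: t => (if nfs x == b then [s] else []) ++ posL t (s + 1) b

-- the write list one group entry produces
def wgroup (labels : List String) (bp : String × List Int) : List (Int × String) :=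
  if bp.2.length == 1 then
    [(PySem.List.pyGetD bp.2 0 0,
      if (PySem.List.pyGetD labels (PySem.List.pyGetD bp.2 0 0) "") == "" then bp.1
      else PySem.List.pyGetD labels (PySem.List.pyGetD bp.2 0 0) "")]
  else (PySem.List.enumerate bp.2 0).map (fun q => (q.2, bp.1 ++ alphabetical_suffix q.1))

def scatter (res : List String) (ws : List (Int × String)) : List String :=
  ws.foldl (fun r w => PySem.List.pySetD r w.1 w.2) res

lemma length_posL (b : String) : ∀ (ls : List String) (s : Int),
    (posL ls s b).length = (ls.map nfs).count b := by
  intro ls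
  induction ls with
  | nil => intro s; simp [posL]
  | cons x t ih =>
    intro s
    by_cases h : nfs x = b <;>
      simp [posL, h, ih]

lemma mem_posL (b : String) : ∀ (ls : List String) (s : Int) (i : Int),
    i ∈ posL ls s b → ∃ k : Nat, k < ls.length ∧ i = s + (k : Int) ∧ ls[k]?.map nfs = some b := by
  intro ls
  induction ls with
  | nil => intro s i h; simp [posL] at h
  | cons x t ih =>
    intro s i h
    simp only [posL, List.mem_append] at h
    rcases h with h | h
    · by_cases hx : nfs x = b
      · simp [hx] at h
        exact ⟨0, by simp, by omega, by simp [hx]⟩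
      · simp [hx] at h
    · rcases ih (s + 1) i h with ⟨k, hk, hi, hb⟩
      exact ⟨k + 1, by simpa using hk, by omega, by simpa using hb⟩

lemma posL_split (b : String) : ∀ (ls : List String) (j : Nat) (s : Int),
    (ls.map nfs)[j]? = some b →
    posL ls s b = posL (ls.take j) s b ++ (s + (j : Int)) :: posL (ls.drop (j + 1)) (s + (j : Int) + 1) b := by
  intro ls
  induction ls with
  | nil => intro j s h; simp at h
  | cons x t ih =>
    intro j s h
    cases j with
    | zero =>
      simp only [List.map_cons, List.getElem?_cons_zero, Option.some.injEq] at h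
      simp [posL, h]
    | succ j' =>
      simp only [List.map_cons, List.getElem?_cons_succ] at h
      have hrec := ih j' (s + 1) h
      have h1 : s + 1 + (j' : Int) = s + ((j' + 1 : Nat) : Int) := by push_cast; ring
      rw [h1] at hrec
      simp only [List.take_succ_cons, List.drop_succ_cons, posL, hrec, List.append_assoc]

lemma filter_enumerate_posL (b : String) : ∀ (ls : List String) (s : Int),
    ((((PySem.List.enumerate ls s).map (fun p => (nfs p.2, p.1))).filter
        (fun p => p.1 == b)).map (fun p => p.2)) = posL ls s b := by
  intro ls
  induction ls with
  | nil => intro s; simp [PySem.List.enumerate_nil, posL]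
  | cons x t ih =>
    intro s
    by_cases h : nfs x = b <;>
      simp [PySem.List.enumerate_cons, posL, h, ih]

-- the grouping dict's items
lemma items_groups (labels : List String) :
    ((PySem.List.enumerate labels 0).foldl
      (fun (d : PySem.Dict String (List Int)) p =>
        d.modify (if p.2 == "" then "Shift" else p.2) [] (fun v => v ++ [p.1]))
      PySem.Dict.empty).items
    = (PySem.Set.ofList (labels.map nfs)).map (fun b => (b, posL labels 0 b)) := by
  have hfold : ((PySem.List.enumerate labels 0).foldl
      (fun (d : PySem.Dict String (List Int)) p =>
        d.modify (if p.2 == "" then "Shift" else p.2) [] (fun v => v ++ [p.1]))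
      PySem.Dict.empty)
      = (((PySem.List.enumerate labels 0).map (fun p => (nfs p.2, p.1))).foldl
          (fun d q => d.modify q.1 [] (fun v => v ++ [q.2])) PySem.Dict.empty) := by
    rw [List.foldl_map]
    rfl
  rw [hfold]
  have hkeys : (((PySem.List.enumerate labels 0).map (fun p => (nfs p.2, p.1))).foldl
          (fun d q => d.modify q.1 [] (fun v => v ++ [q.2])) PySem.Dict.empty).keys
      = PySem.Set.ofList (labels.map nfs) := by
    rw [PySem.Dict.keys_foldl_modify_key ((PySem.List.enumerate labels 0).map (fun p => (nfs p.2, p.1)))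
        (fun q => q.1) [] (fun _ q v => v ++ [q.2]) PySem.Dict.empty]
    show PySem.Set.update [] _ = _
    rw [List.map_map]
    have : ((fun (q : String × Int) => q.1) ∘ fun p => (nfs p.2, p.1)) = (fun (p : Int × String) => nfs p.2) := rfl
    rw [this]
    have h2 : (fun (p : Int × String) => nfs p.2) = (nfs ∘ fun p => p.2) := rfl
    rw [h2, ← List.map_map, PySem.List.map_snd_enumerate]
    rfl
  have hnd : (((PySem.List.enumerate labels 0).map (fun p => (nfs p.2, p.1))).foldl
          (fun d q => d.modify q.1 [] (fun v => v ++ [q.2])) PySem.Dict.empty).keys.Nodup := by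
    exact PySem.Dict.nodup_keys_foldl_modify_key _ (fun (q : String × Int) => q.1) []
      (fun _ q v => v ++ [q.2]) _ PySem.Dict.nodup_keys_empty
  rw [PySem.Dict.items_eq_map_keys _ hnd ([] : List Int), hkeys]
  apply List.map_congr_left
  intro b _
  rw [PySem.Dict.getD_foldl_modify_append, PySem.Dict.getD_empty, filter_enumerate_posL]
  simp

-- scatter basics
lemma length_scatter (ws : List (Int × String)) : ∀ (res : List String),
    (scatter res ws).length = res.length := by
  induction ws with
  | nil => intro res; rfl
  | cons w t ih => intro res; rw [scatter, List.foldl_cons, ← scatter, ih, PySem.List.length_pySetD]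

lemma scatter_miss (j : Nat) (ws : List (Int × String))
    (h : ∀ w ∈ ws, 0 ≤ w.1 ∧ w.1 ≠ (j : Int)) : ∀ (res : List String),
    (scatter res ws)[j]? = res[j]? := by
  induction ws with
  | nil => intro res; rfl
  | cons w t ih =>
    intro res
    obtain ⟨h0, hne⟩ := h w (by simp)
    have ht : ∀ w ∈ t, 0 ≤ w.1 ∧ w.1 ≠ (j : Int) := fun p hp => h p (by simp [hp])
    rw [scatter, List.foldl_cons, ← scatter, ih ht,
        PySem.List.pySetD_of_nonneg _ _ h0]
    apply List.getElem?_set_ne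
    intro hh
    apply hne
    rw [← hh, Int.toNat_of_nonneg h0]

lemma scatter_hit (j : Nat) (v : String) (u w : List (Int × String)) (res : List String)
    (hj : j < res.length) (h : ∀ p ∈ w, 0 ≤ p.1 ∧ p.1 ≠ (j : Int)) :
    (scatter res (u ++ ((j : Int), v) :: w))[j]? = some v := by
  rw [scatter, List.foldl_append, List.foldl_cons]
  rw [show ∀ l, List.foldl (fun r (w : Int × String) => PySem.List.pySetD r w.1 w.2) l w = scatter l w from fun _ => rfl]
  rw [scatter_miss j w h]
  simp only [PySem.List.pySetD_natCast]
  apply List.getElem?_set_self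
  rw [show List.foldl (fun r (w : Int × String) => PySem.List.pySetD r w.1 w.2) res u = scatter res u from rfl]
  rw [length_scatter]
  exact hj

-- B's group loop is the scatter of the flattened write list
lemma fold_eq_scatter (labels : List String) : ∀ (items : List (String × List Int)) (res : List String),
    items.foldl
      (fun res bp =>
        if bp.2.length == 1 then
          let i := PySem.List.pyGetD bp.2 0 0
          let orig := PySem.List.pyGetD labels i ""
          PySem.List.pySetD res i (if orig == "" then bp.1 else orig)
        else
          (PySem.List.enumerate bp.2 0).foldl
            (fun r q => PySem.List.pySetD r q.2 (bp.1 ++ alphabetical_suffix q.1)) res)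
      res
    = scatter res (items.flatMap (wgroup labels)) := by
  intro items
  induction items with
  | nil => intro res; rfl
  | cons hd t ih =>
    intro res
    rw [List.foldl_cons, List.flatMap_cons, scatter, List.foldl_append, ← scatter, ← scatter, ih]
    congr 1
    by_cases h : hd.2.length = 1
    · simp only [wgroup, h, beq_self_eq_true, if_true, scatter, List.foldl_cons, List.foldl_nil]
    · have hb : (hd.2.length == 1) = false := by simp [h]
      simp only [wgroup, hb, Bool.false_eq_true, if_false, scatter, List.foldl_map]

-- every write target of a group sits in its position list
lemma wgroup_target (labels : List String) (b : String) (pos : List Int) (hpos : pos ≠ [])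
    (p : Int × String) (hp : p ∈ wgroup labels (b, pos)) : p.1 ∈ pos := by
  unfold wgroup at hp
  by_cases h : pos.length = 1
  · rcases List.length_eq_one_iff.mp h with ⟨x, rfl⟩
    simp only [h, beq_self_eq_true, if_true, List.mem_singleton] at hp
    have hx : PySem.List.pyGetD [x] (0 : Int) 0 = x := by
      simp [PySem.List.pyGetD, PySem.List.pyGet?, PySem.List.pyIdx?]
    rw [hp, hx]
    simp
  · have hb : (pos.length == 1) = false := by simp [h]
    simp only [hb, Bool.false_eq_true, if_false, List.mem_map] at hp
    rcases hp with ⟨q, hq, rfl⟩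
    rcases (PySem.List.mem_enumerate_iff _ _ _).mp hq with ⟨k, hk, rfl⟩
    simp

-- a group keyed by b' ≠ nfs labels[j] never writes index j
lemma wgroup_other (labels : List String) (j : Nat) (b' : String)
    (hb' : b' ∈ labels.map nfs) (hne : (labels.map nfs)[j]? ≠ some b')
    (p : Int × String) (hp : p ∈ wgroup labels (b', posL labels 0 b')) :
    0 ≤ p.1 ∧ p.1 ≠ (j : Int) := by
  have hpos : posL labels 0 b' ≠ [] := by
    have hl := length_posL b' labels 0
    have hc : 0 < (labels.map nfs).count b' := List.count_pos_iff.mpr hb'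
    intro hnil
    rw [hnil] at hl
    simp at hl
    omega
  have hmem := wgroup_target labels b' _ hpos p hp
  rcases mem_posL b' labels 0 p.1 hmem with ⟨k, hk, hik, hkb⟩
  constructor
  · omega
  · intro hj
    apply hne
    have hkj : k = j := by omega
    rw [← hkj]
    rw [List.getElem?_map]
    rw [List.getElem?_eq_getElem hk] at hkb ⊢
    simpa using hkb

lemma B_eq_specList (labels : List String) :
    disambiguate_labels_py_alt labels = specList labels := by
  have hB : disambiguate_labels_py_alt labels
      = scatter (List.replicate labels.length "")
          (((PySem.Set.ofList (labels.map nfs)).map (fun b => (b, posL labels 0 b))).flatMap (wgroup labels)) := by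
    show ((PySem.List.enumerate labels 0).foldl
      (fun (d : PySem.Dict String (List Int)) p =>
        d.modify (if p.2 == "" then "Shift" else p.2) [] (fun v => v ++ [p.1]))
      PySem.Dict.empty).items.foldl
        (fun res bp =>
          if bp.2.length == 1 then
            let i := PySem.List.pyGetD bp.2 0 0
            let orig := PySem.List.pyGetD labels i ""
            PySem.List.pySetD res i (if orig == "" then bp.1 else orig)
          else
            (PySem.List.enumerate bp.2 0).foldl
              (fun r q => PySem.List.pySetD r q.2 (bp.1 ++ alphabetical_suffix q.1)) res)
        (List.replicate labels.length "") = _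
    rw [items_groups labels, fold_eq_scatter labels]
  rw [hB]
  apply List.ext_getElem?
  intro j
  by_cases hj : j < labels.length
  case neg =>
    have h1 : (scatter (List.replicate labels.length "")
        (((PySem.Set.ofList (labels.map nfs)).map (fun b => (b, posL labels 0 b))).flatMap (wgroup labels))).length
        = labels.length := by rw [length_scatter, List.length_replicate]
    have h2 : (specList labels).length = labels.length := by
      unfold specList
      simp [PySem.List.length_enumerate]
    rw [List.getElem?_eq_none (by omega), List.getElem?_eq_none (by omega)]
  case pos =>
    have hnormj : (labels.map nfs)[j]? = some (nfs labels[j]) := by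
      rw [List.getElem?_map, List.getElem?_eq_getElem hj]; rfl
    -- spec side
    have hspec : (specList labels)[j]? = some (
        if (labels.map nfs).count (nfs labels[j]) == 1
        then (if labels[j] == "" then nfs labels[j] else labels[j])
        else nfs labels[j] ++ alphabetical_suffix
          ((((labels.map nfs).take j).count (nfs labels[j]) : Int))) := by
      unfold specList
      rw [List.getElem?_map, PySem.List.getElem?_enumerate]
      have hz : ((labels.map nfs).zip labels)[j]? = some (nfs labels[j], labels[j]) :=
        List.getElem?_zip_eq_some.mpr ⟨hnormj, List.getElem?_eq_getElem hj⟩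
      rw [hz]
      have h0j : (0 : Int) + (j : Int) = ((j : Nat) : Int) := by ring
      simp only [Option.map_some, h0j, PySem.List.slice_to_natCast]
    rw [hspec]
    -- B side
    have hbm : nfs labels[j] ∈ labels.map nfs := List.mem_map.mpr ⟨labels[j], List.getElem_mem hj, rfl⟩
    obtain ⟨K1, K2, hS⟩ := List.mem_iff_append.mp
      ((PySem.Set.mem_ofList (labels.map nfs) (nfs labels[j])).mpr hbm)
    have hnd := PySem.Set.nodup_ofList (labels.map nfs)
    rw [hS] at hnd
    have hbK1 : nfs labels[j] ∉ K1 := by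
      simp [List.nodup_append] at hnd
      intro hcon
      exact (hnd.2.2 _ hcon).1 rfl
    have hbK2 : nfs labels[j] ∉ K2 := by
      simp [List.nodup_append] at hnd
      exact hnd.2.1.1
    have hKmem : ∀ b' ∈ K1 ++ K2, b' ∈ labels.map nfs := by
      intro b' hb'
      have : b' ∈ PySem.Set.ofList (labels.map nfs) := by
        rw [hS]
        rcases List.mem_append.mp hb' with h | h
        · exact List.mem_append.mpr (Or.inl h)
        · exact List.mem_append.mpr (Or.inr (List.mem_cons_of_mem _ h))
      exact (PySem.Set.mem_ofList _ _).mp this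
    have hother : ∀ (K : List String), (∀ b' ∈ K, b' ∈ labels.map nfs ∧ b' ≠ nfs labels[j]) →
        ∀ p ∈ (K.map (fun b => (b, posL labels 0 b))).flatMap (wgroup labels),
          0 ≤ p.1 ∧ p.1 ≠ (j : Int) := by
      intro K hK p hp
      rw [List.mem_flatMap] at hp
      rcases hp with ⟨e, he, hpe⟩
      rw [List.mem_map] at he
      rcases he with ⟨b', hb', rfl⟩
      obtain ⟨hmem, hneq⟩ := hK b' hb'
      refine wgroup_other labels j b' hmem ?_ p hpe
      rw [hnormj]
      intro hcon
      exact hneq (Option.some.inj hcon).symm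
    have hK1h : ∀ b' ∈ K1, b' ∈ labels.map nfs ∧ b' ≠ nfs labels[j] := by
      intro b' h
      exact ⟨hKmem b' (List.mem_append.mpr (Or.inl h)), fun hcon => hbK1 (hcon ▸ h)⟩
    have hK2h : ∀ b' ∈ K2, b' ∈ labels.map nfs ∧ b' ≠ nfs labels[j] := by
      intro b' h
      exact ⟨hKmem b' (List.mem_append.mpr (Or.inr h)), fun hcon => hbK2 (hcon ▸ h)⟩
    -- decompose the write list
    have hW : ((PySem.Set.ofList (labels.map nfs)).map (fun b => (b, posL labels 0 b))).flatMap (wgroup labels)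
        = (K1.map (fun b => (b, posL labels 0 b))).flatMap (wgroup labels)
          ++ wgroup labels (nfs labels[j], posL labels 0 (nfs labels[j]))
          ++ (K2.map (fun b => (b, posL labels 0 b))).flatMap (wgroup labels) := by
      rw [hS]
      simp [List.flatMap_append, List.append_assoc]
    have h0j : (0 : Int) + (j : Int) = ((j : Nat) : Int) := by ring
    have hsplit := posL_split (nfs labels[j]) labels j 0 hnormj
    rw [h0j] at hsplit
    have hrepl : j < (List.replicate labels.length ("" : String)).length := by
      rw [List.length_replicate]; exact hj
    have hP1len : (posL (labels.take j) 0 (nfs labels[j])).length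
        = ((labels.map nfs).take j).count (nfs labels[j]) := by
      rw [length_posL, ← List.map_take]
    have hP2mem : ∀ p ∈ (PySem.List.enumerate (posL (labels.drop (j+1)) ((j : Int) + 1) (nfs labels[j])) ((((labels.map nfs).take j).count (nfs labels[j]) : Int) + 1)).map
          (fun q => (q.2, nfs labels[j] ++ alphabetical_suffix q.1)),
        0 ≤ p.1 ∧ p.1 ≠ (j : Int) := by
      intro p hp
      rw [List.mem_map] at hp
      rcases hp with ⟨q, hq, rfl⟩
      rcases (PySem.List.mem_enumerate_iff _ _ _).mp hq with ⟨k, hk, rfl⟩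
      have hqm : (posL (labels.drop (j+1)) ((j : Int) + 1) (nfs labels[j]))[k] ∈ _ := List.getElem_mem hk
      rcases mem_posL _ _ _ _ hqm with ⟨m, hm, him, _⟩
      simp only
      rw [him]
      constructor <;> [omega; (intro h; omega)]
    by_cases hc : (labels.map nfs).count (nfs labels[j]) = 1
    · -- singleton group
      have hlen1 : (posL labels 0 (nfs labels[j])).length = 1 := by rw [length_posL]; exact hc
      rw [hsplit] at hlen1
      simp only [List.length_append, List.length_cons] at hlen1
      have hP1 : posL (labels.take j) 0 (nfs labels[j]) = [] :=
        List.eq_nil_iff_length_eq_zero.mpr (by omega)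
      have hP2 : posL (labels.drop (j+1)) ((j : Int) + 1) (nfs labels[j]) = [] :=
        List.eq_nil_iff_length_eq_zero.mpr (by omega)
      rw [hP1, hP2] at hsplit
      simp only [List.nil_append] at hsplit
      have hmid : wgroup labels (nfs labels[j], posL labels 0 (nfs labels[j]))
          = [((j : Int), if labels[j] == "" then nfs labels[j] else labels[j])] := by
        rw [hsplit]
        unfold wgroup
        have hg : PySem.List.pyGetD [((j : Nat) : Int)] (0 : Int) 0 = ((j : Nat) : Int) := by
          simp [PySem.List.pyGetD, PySem.List.pyGet?, PySem.List.pyIdx?]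
        simp only [List.length_cons, List.length_nil, beq_self_eq_true, if_true, hg,
          PySem.List.pyGetD_natCast]
        rw [List.getD_eq_getElem?_getD, List.getElem?_eq_getElem hj]
        rfl
      rw [hW, hmid, List.append_assoc, List.singleton_append]
      rw [scatter_hit j _ _ _ _ hrepl (hother K2 hK2h)]
      have hcb : ((labels.map nfs).count (nfs labels[j]) == 1) = true := by simp [hc]
      rw [hcb]
      simp
    · -- duplicated group
      have hlen : (posL labels 0 (nfs labels[j])).length = (labels.map nfs).count (nfs labels[j]) :=
        length_posL _ _ _
      have hb2 : ((posL labels 0 (nfs labels[j])).length == 1) = false := by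
        simp [hlen, hc]
      have hmid : wgroup labels (nfs labels[j], posL labels 0 (nfs labels[j]))
          = (PySem.List.enumerate (posL (labels.take j) 0 (nfs labels[j])) 0).map
              (fun q => (q.2, nfs labels[j] ++ alphabetical_suffix q.1))
            ++ (((j : Int)), nfs labels[j] ++ alphabetical_suffix ((((labels.map nfs).take j).count (nfs labels[j]) : Int)))
              :: (PySem.List.enumerate (posL (labels.drop (j+1)) ((j : Int) + 1) (nfs labels[j])) ((((labels.map nfs).take j).count (nfs labels[j]) : Int) + 1)).map
                  (fun q => (q.2, nfs labels[j] ++ alphabetical_suffix q.1)) := by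
        unfold wgroup
        simp only [hb2, Bool.false_eq_true, if_false]
        rw [hsplit, PySem.List.enumerate_append, PySem.List.enumerate_cons]
        rw [List.map_append, List.map_cons]
        rw [hP1len]
        norm_num
      rw [hW, hmid]
      rw [show ∀ (a b c d : List (Int × String)) (x : Int × String),
            a ++ (b ++ x :: c) ++ d = (a ++ b) ++ x :: (c ++ d) from by intros; simp [List.append_assoc]]
      have htail : ∀ p ∈ (PySem.List.enumerate (posL (labels.drop (j+1)) ((j : Int) + 1) (nfs labels[j])) ((((labels.map nfs).take j).count (nfs labels[j]) : Int) + 1)).map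
            (fun q => (q.2, nfs labels[j] ++ alphabetical_suffix q.1))
          ++ (K2.map (fun b => (b, posL labels 0 b))).flatMap (wgroup labels),
          0 ≤ p.1 ∧ p.1 ≠ (j : Int) := by
        intro p hp
        rcases List.mem_append.mp hp with h | h
        · exact hP2mem p h
        · exact hother K2 hK2h p h
      rw [scatter_hit j _ _ _ _ hrepl htail]
      have hcb : ((labels.map nfs).count (nfs labels[j]) == 1) = false := by simp [hc]
      rw [hcb]
      simp

-- ===== VERDICT (by name: the statement is the Claim_ definition above) =====
theorem disambiguate_labels_py_spec : Claim_equal_disambiguate_labels_py := by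
  intro labels _
  unfold Spec_disambiguate_labels_py
  rw [A_eq_specList, B_eq_specList]
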